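-- pv_equiv track=rewrite | github.com/Dessous/DL-MixMatch | mixmatch.py | _interleave_offsets
-- ===== SOURCE A (Python) =====
-- def _interleave_offsets(batch_size, n_groups):
--     groups = [batch_size // n_groups] * n_groups
--     for x in range(batch_size - sum(groups)):
--         groups[-x - 1] += 1
--     offsets = [0]
--     for g in groups:
--         offsets.append(offsets[-1] + g)
--     assert offsets[-1] == batch_size
--     return offsets
-- ===== SOURCE B (Python) =====
-- def _interleave_offsets(batch_size, n_groups):
--     base, rem = divmod(batch_size, n_groups)
--     cut = n_groups - rem
--     return [i * base + max(0, i - cut) for i in range(n_groups + 1)]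
-- ===== Notes on version B (the rewrite author's own statement) =====
-- stated objective: simpler
-- what changed: Replaces the remainder-distribution loop plus running-total prefix-sum loop with a single closed-form comprehension offsets[i] = i*base + max(0, i - (n_groups - rem)).
-- outside the precondition, e.g. on _interleave_offsets(0, -1): A returns [0], B returns []
import Mathlib
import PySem

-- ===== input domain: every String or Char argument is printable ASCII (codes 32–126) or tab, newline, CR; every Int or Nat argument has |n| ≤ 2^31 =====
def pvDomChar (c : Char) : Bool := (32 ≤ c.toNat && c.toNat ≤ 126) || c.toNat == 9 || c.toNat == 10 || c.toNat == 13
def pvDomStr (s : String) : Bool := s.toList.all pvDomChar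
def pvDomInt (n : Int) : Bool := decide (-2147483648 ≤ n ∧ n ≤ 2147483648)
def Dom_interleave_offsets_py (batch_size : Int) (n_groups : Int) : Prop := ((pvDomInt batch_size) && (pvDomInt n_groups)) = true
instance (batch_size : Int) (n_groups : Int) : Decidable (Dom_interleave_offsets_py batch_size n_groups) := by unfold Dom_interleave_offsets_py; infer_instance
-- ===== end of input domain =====

-- B replaces A's two loops (remainder distribution + running-total prefix sums) with one
-- closed-form comprehension offsets[i] = i*base + max(0, i - (n_groups - rem)); objective: simpler, same O(n_groups) cost.


-- ===== PORT A =====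
-- groups[-x - 1] += 1
def pvStepInc (gs : List Int) (x : Int) : List Int :=
  PySem.List.pySetD gs (-x - 1) (PySem.List.pyGetD gs (-x - 1) 0 + 1)

-- offsets.append(offsets[-1] + g)
def pvStepOff (os : List Int) (g : Int) : List Int :=
  os ++ [PySem.List.pyGetD os (-1) 0 + g]

-- literal port of A; the assert (always true where A returns normally) has no value effect
def interleave_offsets_py (batch_size : Int) (n_groups : Int) : List Int :=
  let groups : List Int := List.replicate n_groups.toNat (PySem.Int.floordiv batch_size n_groups)
  let groups := (PySem.List.pyRange 0 (batch_size - groups.sum)).foldl pvStepInc groups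
  groups.foldl pvStepOff [0]

-- ===== PORT B =====
def interleave_offsets_py_alt (batch_size : Int) (n_groups : Int) : List Int :=
  let base := PySem.Int.floordiv batch_size n_groups
  let rem := PySem.Int.mod batch_size n_groups
  let cut := n_groups - rem
  (PySem.List.pyRange 0 (n_groups + 1)).map (fun i => i * base + max 0 (i - cut))

-- ===== PRECONDITION & SPEC =====
-- Pre_ excludes n_groups ≤ 0: there A raises (ZeroDivisionError, IndexError or AssertionError)
-- except on the degenerate batch_size = 0 with n_groups < 0, where A's [0] is an accident of
-- the empty group list and B naturally returns [].
def Pre_interleave_offsets_py (_batch_size : Int) (n_groups : Int) : Prop := 1 ≤ n_groups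
instance (batch_size : Int) (n_groups : Int) : Decidable (Pre_interleave_offsets_py batch_size n_groups) := by unfold Pre_interleave_offsets_py; infer_instance

def pvWitness_interleave_offsets_py : Int × Int := (10, 3)

def Spec_interleave_offsets_py (batch_size : Int) (n_groups : Int) (out : List Int) : Prop := out = interleave_offsets_py_alt batch_size n_groups
instance (batch_size : Int) (n_groups : Int) (out : List Int) : Decidable (Spec_interleave_offsets_py batch_size n_groups out) := by unfold Spec_interleave_offsets_py; infer_instance

-- ===== CLAIM (what is proved, stated in full; the proofs are below) =====
def Claim_equal_interleave_offsets_py : Prop := ∀ (batch_size : Int) (n_groups : Int), Dom_interleave_offsets_py batch_size n_groups → Pre_interleave_offsets_py batch_size n_groups → Spec_interleave_offsets_py batch_size n_groups (interleave_offsets_py batch_size n_groups)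

-- ===== LEMMAS AND PROOFS =====
-- Python's negative index -k-1 into a list of length n > k resolves to position n-(k+1)
theorem pvIdx_neg (n k : Nat) (h : k < n) :
    PySem.List.pyIdx? n (-(k:Int)-1) = some (n - (k+1)) := by
  unfold PySem.List.pyIdx?
  rw [if_neg (by omega), if_pos (by omega)]
  congr 1
  omega

-- xs[-1] on a nonempty list is its last element
theorem pvLast {v : Int} (os : List Int) :
    PySem.List.pyGetD (os ++ [v]) (-1) 0 = v := by
  have h : PySem.List.pyIdx? (os ++ [v]).length (-1) = some os.length := by
    have := pvIdx_neg (os ++ [v]).length 0 (by simp)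
    simpa using this
  simp only [List.length_append, List.length_cons, List.length_nil] at h
  simp [PySem.List.pyGetD, PySem.List.pyGet?, h]

-- after k iterations A's first loop has bumped the last k groups by one
theorem pv_incLoop (n : Nat) (base : Int) (k : Nat) (hk : k ≤ n) :
    (PySem.List.pyRange 0 (k : Int)).foldl pvStepInc (List.replicate n base)
      = List.replicate (n - k) base ++ List.replicate k (base + 1) := by
  induction k with
  | zero => simp [PySem.List.pyRange]
  | succ k ih =>
    have hk' : k ≤ n := by omega
    push_cast
    rw [PySem.List.pyRange_one_succ_right (by positivity), List.foldl_append, ih hk']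
    simp only [List.foldl_cons, List.foldl_nil]
    have hn : n - k + k = n := by omega
    have hidx : PySem.List.pyIdx? (n - k + k) (-(k:Int) - 1) = some (n - (k+1)) := by
      rw [hn]; exact pvIdx_neg n k (by omega)
    have hget : PySem.List.pyGetD (List.replicate (n - k) base ++ List.replicate k (base + 1)) (-(k:Int) - 1) 0 = base := by
      unfold PySem.List.pyGetD PySem.List.pyGet?
      simp only [List.length_append, List.length_replicate, hidx, Option.bind_some]
      rw [List.getElem?_append_left (by simp; omega), List.getElem?_replicate, if_pos (by omega)]
      rfl
    unfold pvStepInc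
    rw [hget]
    unfold PySem.List.pySetD PySem.List.pySet?
    simp only [List.length_append, List.length_replicate, hidx, Option.map_some, Option.getD_some]
    rw [List.set_append_left _ _ (by simp; omega)]
    have hrep : List.replicate (n - k) base = List.replicate (n - (k+1)) base ++ [base] := by
      rw [← List.replicate_succ']
      congr 1; omega
    rw [hrep, List.set_append_right _ _ (by simp)]
    simp [List.replicate_succ]

-- A's second loop appends running prefix sums of a constant block
theorem pv_offLoop (m : Nat) (c s : Int) (os' : List Int) :
    (List.replicate m c).foldl pvStepOff (os' ++ [s])
      = (os' ++ [s]) ++ (List.range m).map (fun (j : Nat) => s + ((j : Int) + 1) * c) := by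
  induction m generalizing os' s with
  | zero => simp
  | succ m ih =>
    rw [List.replicate_succ, List.foldl_cons]
    have hstep : pvStepOff (os' ++ [s]) c = (os' ++ [s]) ++ [s + c] := by
      unfold pvStepOff; rw [pvLast]
    rw [hstep, ih (s + c) (os' ++ [s]), List.range_succ_eq_map, List.map_cons, List.map_map]
    simp only [List.append_assoc, List.cons_append, List.nil_append]
    rw [List.append_cancel_left_eq]
    refine List.cons_eq_cons.mpr ⟨rfl, List.cons_eq_cons.mpr ⟨by norm_num, ?_⟩⟩
    apply List.map_congr_left
    intro j _
    simp only [Function.comp, Nat.succ_eq_add_one]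
    push_cast
    ring

-- the equivalence on 1 ≤ n_groups
theorem pv_main (bs ng : Int) (h : 1 ≤ ng) :
    interleave_offsets_py bs ng = interleave_offsets_py_alt bs ng := by
  have hng : (0:Int) < ng := by omega
  set base := PySem.Int.floordiv bs ng with hbase
  set r := PySem.Int.mod bs ng with hr
  have hr0 : 0 ≤ r := PySem.Int.mod_nonneg bs hng
  have hrlt : r < ng := PySem.Int.mod_lt bs hng
  have heq : base * ng + r = bs := PySem.Int.floordiv_mul_add_mod bs ng
  set n := ng.toNat with hn
  have hnn : (n : Int) = ng := Int.toNat_of_nonneg (by omega)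
  set r' := r.toNat with hr'
  have hrr : (r' : Int) = r := Int.toNat_of_nonneg hr0
  have hr'n : r' < n := by omega
  have hn1 : 1 ≤ n := by omega
  set a := n - r' with ha
  have ha1 : 1 ≤ a := by omega
  -- A side
  unfold interleave_offsets_py
  dsimp only
  rw [← hn, ← hbase]
  have hsum : (List.replicate n base).sum = (n : Int) * base := by
    rw [List.sum_replicate, nsmul_eq_mul]
  rw [hsum]
  have hrange : bs - (n : Int) * base = (r' : Int) := by
    rw [hrr, hnn]; linear_combination -heq
  rw [hrange, pv_incLoop n base r' (by omega), List.foldl_append]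
  have h1 : (List.replicate (n - r') base).foldl pvStepOff [0]
      = ([] ++ [(0:Int)]) ++ (List.range a).map (fun (j : Nat) => 0 + ((j : Int) + 1) * base) := by
    rw [← ha]; exact pv_offLoop a base 0 []
  rw [← ha] at h1 ⊢
  rw [h1]
  have hsplit : (List.range a).map (fun (j : Nat) => 0 + ((j : Int) + 1) * base)
      = (List.range (a-1)).map (fun (j : Nat) => 0 + ((j : Int) + 1) * base) ++ [(a : Int) * base] := by
    conv_lhs => rw [show a = (a-1) + 1 by omega, List.range_succ]
    rw [List.map_append]
    congr 1
    simp only [List.map_cons, List.map_nil, List.cons.injEq, and_true]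
    have hc : ((a - 1 : Nat) : Int) = (a : Int) - 1 := by omega
    rw [hc]; ring
  rw [show ([] ++ [(0:Int)]) ++ (List.range a).map (fun (j : Nat) => 0 + ((j : Int) + 1) * base)
      = (([(0:Int)] ++ (List.range (a-1)).map (fun (j : Nat) => 0 + ((j : Int) + 1) * base)) ++ [(a : Int) * base]) by
    rw [hsplit]; simp]
  rw [pv_offLoop r' (base+1) ((a:Int)*base) _]
  -- B side
  unfold interleave_offsets_py_alt
  dsimp only
  rw [← hbase, ← hr]
  have hng1 : ng + 1 = ((n + 1 : Nat) : Int) := by omega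
  rw [hng1, PySem.List.pyRange_zero_natCast, List.map_map]
  have hcut : ng - r = (a : Int) := by omega
  rw [hcut]
  have hsplitn : n + 1 = (1 + a) + r' := by omega
  rw [hsplitn, List.range_add, List.range_add]
  simp only [List.map_append, List.map_map]
  have hpa : List.range a = List.range (a-1) ++ [a-1] := by
    conv_lhs => rw [show a = (a-1)+1 by omega]
    rw [List.range_succ]
  rw [hpa, List.map_append]
  simp only [List.range_one, List.map_cons, List.map_nil, List.append_assoc, List.cons_append,
    List.nil_append, Function.comp]
  refine List.cons_eq_cons.mpr ⟨?_, ?_⟩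
  · simp
  congr 1
  · apply List.map_congr_left
    intro j hj
    have hja : j < a - 1 := List.mem_range.mp hj
    simp only [Function.comp_apply]
    push_cast
    rw [max_eq_left (by omega)]
    ring
  refine List.cons_eq_cons.mpr ⟨?_, ?_⟩
  · have hc : ((1 + (a - 1) : Nat) : Int) = (a : Int) := by omega
    rw [hc]
    rw [max_eq_left (by omega)]
    ring
  · apply List.map_congr_left
    intro j hj
    have hjr : j < r' := List.mem_range.mp hj
    simp only [Function.comp_apply]
    push_cast
    rw [max_eq_right (by omega)]
    ring

-- ===== VERDICT (by name: the statement is the Claim_ definition above) =====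
theorem interleave_offsets_py_spec : Claim_equal_interleave_offsets_py := by
  intro bs ng _ hpre
  unfold Spec_interleave_offsets_py
  exact pv_main bs ng hpre
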